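-- pv_equiv track=rewrite | github.com/mahrens917/ci_shared | ci_tools/ci_runtime/coverage.py | _find_coverage_table
-- ===== SOURCE A (Python) =====
-- from typing import Optional
--
-- def _find_coverage_table(lines: list[str]) -> Optional[list[str]]:
--     """Return the lines that compose the coverage table in the pytest report."""
--     header_index: Optional[int] = None
--     for idx, line in enumerate(lines):
--         stripped = line.strip()
--         if stripped.startswith("Name") and "Cover" in stripped:
--             header_index = idx
--             break
--     if header_index is None:
--         return None
--     table: list[str] = [lines[header_index]]
--     for line in lines[header_index + 1 :]:
--         table.append(line)
--         if not line.strip():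
--             break
--     return table if len(table) > 1 else None
-- ===== SOURCE B (Python) =====
-- from typing import Optional
--
--
-- def _is_header(line: str) -> bool:
--     stripped = line.strip()
--     return stripped.startswith("Name") and "Cover" in stripped
--
--
-- def _find_coverage_table(lines: list[str]) -> Optional[list[str]]:
--     """Return the lines that compose the coverage table in the pytest report."""
--     SEARCH, COLLECT, DONE = 0, 1, 2
--     state = SEARCH
--     acc: list[str] = []
--     for line in lines:
--         if state == SEARCH:
--             if _is_header(line):
--                 acc.append(line)
--                 state = COLLECT
--         elif state == COLLECT:
--             acc.append(line)
--             if not line.strip():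
--                 state = DONE
--     return acc if len(acc) > 1 else None
-- ===== Notes on version B (the rewrite author's own statement) =====
-- stated objective: alternative
-- what changed: Replaces A's two staged loops (index-finding search with break, then an append loop over a slice of the list) by a single left-to-right pass over all lines driven by a three-state machine (searching/collecting/done) with one accumulator and no indexing or slicing.
import Mathlib
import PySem

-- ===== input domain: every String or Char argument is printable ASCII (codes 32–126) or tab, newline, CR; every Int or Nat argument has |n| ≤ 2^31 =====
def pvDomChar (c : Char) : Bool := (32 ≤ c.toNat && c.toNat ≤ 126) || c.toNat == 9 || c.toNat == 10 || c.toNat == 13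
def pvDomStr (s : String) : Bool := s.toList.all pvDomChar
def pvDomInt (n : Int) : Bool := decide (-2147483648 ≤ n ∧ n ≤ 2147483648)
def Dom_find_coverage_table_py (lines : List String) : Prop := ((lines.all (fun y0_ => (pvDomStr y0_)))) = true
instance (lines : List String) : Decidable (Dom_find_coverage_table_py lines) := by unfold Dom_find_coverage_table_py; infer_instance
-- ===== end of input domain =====

-- B replaces A's two staged loops (header search with break, then append loop over a slice)
-- by one fold over all lines driving a three-state machine (objective: alternative decomposition).

-- ===== PORT A =====
-- 'stripped.startswith("Name") and "Cover" in stripped'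
def pvIsHeader (line : String) : Bool :=
  let stripped := PySem.Str.strip line
  PySem.Str.startswith stripped "Name" && PySem.Str.isIn "Cover" stripped

-- A's first loop: 'for idx, line in enumerate(lines): … break'
def pvFindHeaderIdx : List String → Nat → Option Nat
  | [], _ => none
  | l :: rest, idx => if pvIsHeader l then some idx else pvFindHeaderIdx rest (idx + 1)

-- A's second loop: 'for line in lines[header_index+1:]: table.append(line); if not line.strip(): break'
def pvTableLoop : List String → List String → List String
  | [], table => table
  | l :: rest, table =>
    let table := table ++ [l]
    if PySem.Str.strip l = "" then table else pvTableLoop rest table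

def find_coverage_table_py (lines : List String) : Option (List String) :=
  match pvFindHeaderIdx lines 0 with
  | none => none
  | some header_index =>
    let table := pvTableLoop (PySem.List.slice lines (some ((header_index : Int) + 1)) none)
                             [PySem.List.pyGetD lines (header_index : Int) ""]
    if table.length > 1 then some table else none

-- ===== PORT B =====
-- B's header test
def pvIsHeaderB (line : String) : Bool :=
  let stripped := PySem.Str.strip line
  PySem.Str.startswith stripped "Name" && PySem.Str.isIn "Cover" stripped

-- state machine step: state 0 = searching for the header, 1 = collecting table lines, 2 = done
def pvStep (st : Nat × List String) (line : String) : Nat × List String :=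
  match st with
  | (0, acc) =>
    if pvIsHeaderB line then (1, acc ++ [line]) else (0, acc)
  | (1, acc) =>
    let acc := acc ++ [line]
    if PySem.Str.strip line = "" then (2, acc) else (1, acc)
  | (s, acc) => (s, acc)

def find_coverage_table_py_alt (lines : List String) : Option (List String) :=
  let acc := (lines.foldl pvStep (0, [])).2
  if acc.length > 1 then some acc else none

-- ===== PRECONDITION & SPEC =====
def Spec_find_coverage_table_py (lines : List String) (out : Option (List String)) : Prop := out = find_coverage_table_py_alt lines
instance (lines : List String) (out : Option (List String)) : Decidable (Spec_find_coverage_table_py lines out) := by unfold Spec_find_coverage_table_py; infer_instance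

-- ===== CLAIM (what is proved, stated in full; the proofs are below) =====
def Claim_equal_find_coverage_table_py : Prop := ∀ (lines : List String), Dom_find_coverage_table_py lines → Spec_find_coverage_table_py lines (find_coverage_table_py lines)

-- ===== LEMMAS AND PROOFS =====

-- state 2 is absorbing
theorem foldl_pvStep_done (l : List String) (acc : List String) :
    l.foldl pvStep (2, acc) = (2, acc) := by
  induction l with
  | nil => rfl
  | cons h t ih => simpa [pvStep] using ih

-- the fold from the collecting state accumulates exactly A's second loop
theorem foldl_pvStep_collect (l : List String) (acc : List String) :
    (l.foldl pvStep (1, acc)).2 = pvTableLoop l acc := by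
  induction l generalizing acc with
  | nil => rfl
  | cons h t ih =>
    by_cases hb : PySem.Str.strip h = ""
    · simp [List.foldl_cons, pvStep, hb, pvTableLoop, foldl_pvStep_done]
    · simp [List.foldl_cons, pvStep, hb, pvTableLoop, ih]

-- the fold from the searching state = A's header search followed by A's table loop
theorem foldl_pvStep_search (l : List String) (acc : List String) :
    (l.foldl pvStep (0, acc)).2 =
      match l.findIdx? pvIsHeader with
      | none => acc
      | some i => pvTableLoop (l.drop (i + 1)) (acc ++ [l.getD i ""]) := by
  induction l generalizing acc with
  | nil => rfl
  | cons h t ih =>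
    by_cases hh : pvIsHeader h
    · have hh' : pvIsHeaderB h = true := hh
      simp [List.foldl_cons, pvStep, hh', List.findIdx?_cons, hh, foldl_pvStep_collect]
    · have hh' : pvIsHeaderB h = false := by simpa using hh
      simp only [List.foldl_cons, pvStep, hh', if_false, Bool.false_eq_true]
      rw [ih]
      simp [List.findIdx?_cons, hh]
      cases t.findIdx? pvIsHeader <;> simp

-- A's index-carrying search equals the library first-index search, shifted by the accumulator
theorem pvFindHeaderIdx_eq (lines : List String) (idx : Nat) :
    pvFindHeaderIdx lines idx = (lines.findIdx? pvIsHeader).map (· + idx) := by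
  induction lines generalizing idx with
  | nil => simp [pvFindHeaderIdx]
  | cons l rest ih =>
    simp only [pvFindHeaderIdx, List.findIdx?_cons]
    by_cases h : pvIsHeader l
    · simp [h]
    · simp only [h, if_false, Bool.false_eq_true, ih (idx + 1)]
      cases rest.findIdx? pvIsHeader <;> simp <;> try omega

-- ===== VERDICT (by name: the statement is the Claim_ definition above) =====
theorem find_coverage_table_py_spec : Claim_equal_find_coverage_table_py := by
  intro lines _
  unfold Spec_find_coverage_table_py find_coverage_table_py find_coverage_table_py_alt
  rw [pvFindHeaderIdx_eq, foldl_pvStep_search]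
  cases hF : lines.findIdx? pvIsHeader with
  | none => simp
  | some h =>
    have hlt : h < lines.length := (List.findIdx?_eq_some_iff_findIdx_eq.mp hF).1
    have hslice : PySem.List.slice lines (some ((h : Int) + 1)) none = lines.drop (h + 1) := by
      rw [PySem.List.slice_from lines (a := (h : Int) + 1) (by positivity)]
      norm_num [Int.toNat_add]
    have hget : PySem.List.pyGetD lines (h : Int) "" = lines.getD h "" := by
      simp [PySem.List.pyGetD_natCast, List.getD, hlt]
    simp [hslice, hget]
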